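-- pv_equiv track=rewrite | github.com/bizoncan/goruntu_final | main.py | compare_defects
-- ===== SOURCE A (Python) =====
-- def compare_defects(detected_defects, xml_defects, threshold=10):
--     correct_detections = 0
--     for detected in detected_defects:
--         for xml_defect in xml_defects:
--             if (abs(detected[0] - xml_defect[0]) <= threshold and
--                 abs(detected[1] - xml_defect[1]) <= threshold and
--                 abs(detected[2] - xml_defect[2]) <= threshold and
--                 abs(detected[3] - xml_defect[3]) <= threshold):
--                 correct_detections += 1
--                 break
--     return correct_detections
-- ===== SOURCE B (Python) =====
-- def compare_defects(detected_defects, xml_defects, threshold=10):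
--     # Spatial hash: bucket xml defects by 4D cell of side threshold+1; a match
--     # within threshold can only live in one of the 81 neighbouring cells.
--     if threshold < 0 or not xml_defects or not detected_defects:
--         return 0
--     cell = threshold + 1
--     grid = {}
--     for x in xml_defects:
--         k = (x[0] // cell, x[1] // cell, x[2] // cell, x[3] // cell)
--         grid.setdefault(k, []).append(x)
--     offsets = [(a, b, c, d) for a in (-1, 0, 1) for b in (-1, 0, 1)
--                for c in (-1, 0, 1) for d in (-1, 0, 1)]
--     count = 0
--     for det in detected_defects:
--         k0 = det[0] // cell
--         k1 = det[1] // cell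
--         k2 = det[2] // cell
--         k3 = det[3] // cell
--         if any(abs(det[0] - x[0]) <= threshold and abs(det[1] - x[1]) <= threshold
--                and abs(det[2] - x[2]) <= threshold and abs(det[3] - x[3]) <= threshold
--                for (a, b, c, d) in offsets
--                for x in grid.get((k0 + a, k1 + b, k2 + c, k3 + d), [])):
--             count += 1
--     return count
-- ===== Notes on version B (the rewrite author's own statement) =====
-- stated objective: alternative
-- what changed: Replaces A's all-pairs nested scan with a 4D spatial hash: xml defects are bucketed by their cell (side threshold+1) in a dict built once, and each detected defect only probes the 81 neighbouring cells for a match.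
-- outside the precondition, e.g. on compare_defects([(0,)], [(100,)], 5): A returns 0, B raises IndexError
import Mathlib
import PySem

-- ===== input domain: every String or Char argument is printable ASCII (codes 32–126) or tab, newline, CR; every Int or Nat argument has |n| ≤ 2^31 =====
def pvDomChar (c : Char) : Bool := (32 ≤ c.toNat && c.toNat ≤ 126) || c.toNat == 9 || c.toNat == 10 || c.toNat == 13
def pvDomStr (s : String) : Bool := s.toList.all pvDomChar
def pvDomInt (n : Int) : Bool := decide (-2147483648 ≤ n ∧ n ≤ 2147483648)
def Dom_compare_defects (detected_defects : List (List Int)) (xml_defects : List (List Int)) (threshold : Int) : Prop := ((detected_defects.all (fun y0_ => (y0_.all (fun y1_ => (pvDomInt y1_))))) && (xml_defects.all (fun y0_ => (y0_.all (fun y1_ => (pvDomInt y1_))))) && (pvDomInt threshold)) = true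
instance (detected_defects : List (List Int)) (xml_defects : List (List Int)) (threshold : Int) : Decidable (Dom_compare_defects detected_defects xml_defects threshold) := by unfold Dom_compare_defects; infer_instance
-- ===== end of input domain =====

-- B replaces A's all-pairs scan by a 4D spatial hash (cell side threshold+1, 81 neighbour cells per query).

-- ===== PORT A =====
-- inner 'for xml_defect in xml_defects: … break' of A
def cdScan (detected : List Int) (xs : List (List Int)) (threshold : Int) (acc : Int) : Int :=
  match xs with
  | [] => acc
  | x :: rest =>
    if |PySem.List.pyGetD detected 0 0 - PySem.List.pyGetD x 0 0| ≤ threshold ∧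
       |PySem.List.pyGetD detected 1 0 - PySem.List.pyGetD x 1 0| ≤ threshold ∧
       |PySem.List.pyGetD detected 2 0 - PySem.List.pyGetD x 2 0| ≤ threshold ∧
       |PySem.List.pyGetD detected 3 0 - PySem.List.pyGetD x 3 0| ≤ threshold then
      acc + 1
    else
      cdScan detected rest threshold acc

def compare_defects (detected_defects : List (List Int)) (xml_defects : List (List Int)) (threshold : Int) : Int :=
  detected_defects.foldl (fun acc detected => cdScan detected xml_defects threshold acc) 0

-- ===== PORT B =====
def cdKey (x : List Int) (cell : Int) : Int × Int × Int × Int :=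
  (PySem.Int.floordiv (PySem.List.pyGetD x 0 0) cell,
   PySem.Int.floordiv (PySem.List.pyGetD x 1 0) cell,
   PySem.Int.floordiv (PySem.List.pyGetD x 2 0) cell,
   PySem.Int.floordiv (PySem.List.pyGetD x 3 0) cell)

def cdClose (det x : List Int) (t : Int) : Bool :=
  decide (|PySem.List.pyGetD det 0 0 - PySem.List.pyGetD x 0 0| ≤ t) &&
  decide (|PySem.List.pyGetD det 1 0 - PySem.List.pyGetD x 1 0| ≤ t) &&
  decide (|PySem.List.pyGetD det 2 0 - PySem.List.pyGetD x 2 0| ≤ t) &&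
  decide (|PySem.List.pyGetD det 3 0 - PySem.List.pyGetD x 3 0| ≤ t)

def cdOffsets : List (Int × Int × Int × Int) :=
  ([-1, 0, 1] : List Int).flatMap (fun a =>
    ([-1, 0, 1] : List Int).flatMap (fun b =>
      ([-1, 0, 1] : List Int).flatMap (fun c =>
        ([-1, 0, 1] : List Int).map (fun d => (a, b, c, d)))))

def compare_defects_alt (detected_defects : List (List Int)) (xml_defects : List (List Int)) (threshold : Int) : Int :=
  if threshold < 0 ∨ xml_defects = [] ∨ detected_defects = [] then 0
  else
    let cell := threshold + 1
    let grid : PySem.Dict (Int × Int × Int × Int) (List (List Int)) :=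
      xml_defects.foldl (fun g x => g.modify (cdKey x cell) [] (fun l => l ++ [x])) PySem.Dict.empty
    detected_defects.foldl (fun count det =>
      let k := cdKey det cell
      if cdOffsets.any (fun o =>
          (grid.getD (k.1 + o.1, k.2.1 + o.2.1, k.2.2.1 + o.2.2.1, k.2.2.2 + o.2.2.2) []).any
            (fun x => cdClose det x threshold)) then
        count + 1
      else count) 0

-- ===== PRECONDITION & SPEC =====
-- Pre_ excludes only inputs on which the Python A raises IndexError (an inner list shorter than
-- 4 that the comparison actually reads); it also excludes inputs where a too-short list is read
-- but the conjunction short-circuits before the missing index (A returns there, B raises).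
def Pre_compare_defects (detected_defects : List (List Int)) (xml_defects : List (List Int)) (threshold : Int) : Prop :=
  detected_defects = [] ∨ xml_defects = [] ∨
    ((∀ l ∈ detected_defects, 4 ≤ l.length) ∧ (∀ l ∈ xml_defects, 4 ≤ l.length)) ∨
    (threshold < 0 ∧ (∀ l ∈ detected_defects, l ≠ []) ∧ (∀ l ∈ xml_defects, l ≠ []))
instance (detected_defects : List (List Int)) (xml_defects : List (List Int)) (threshold : Int) : Decidable (Pre_compare_defects detected_defects xml_defects threshold) := by unfold Pre_compare_defects; infer_instance

def pvWitness_compare_defects : List (List Int) × List (List Int) × Int :=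
  ([[0, 0, 0, 0], [50, 50, 50, 50]], [[3, 2, 1, 0], [100, 100, 100, 100]], 5)

def Spec_compare_defects (detected_defects : List (List Int)) (xml_defects : List (List Int)) (threshold : Int) (out : Int) : Prop := out = compare_defects_alt detected_defects xml_defects threshold
instance (detected_defects : List (List Int)) (xml_defects : List (List Int)) (threshold : Int) (out : Int) : Decidable (Spec_compare_defects detected_defects xml_defects threshold out) := by unfold Spec_compare_defects; infer_instance

-- ===== CLAIM (what is proved, stated in full; the proofs are below) =====
def Claim_equal_compare_defects : Prop := ∀ (detected_defects : List (List Int)) (xml_defects : List (List Int)) (threshold : Int), Dom_compare_defects detected_defects xml_defects threshold → Pre_compare_defects detected_defects xml_defects threshold → Spec_compare_defects detected_defects xml_defects threshold (compare_defects detected_defects xml_defects threshold)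

-- ===== LEMMAS AND PROOFS =====

-- A's inner loop returns acc+1 exactly when some xml defect is close.
theorem cdScan_eq (det : List Int) (xs : List (List Int)) (t acc : Int) :
    cdScan det xs t acc = if ∃ x ∈ xs, cdClose det x t = true then acc + 1 else acc := by
  induction xs with
  | nil => simp [cdScan]
  | cons x rest ih =>
    simp only [cdScan, ih]
    by_cases h : cdClose det x t = true
    · have h' : (|PySem.List.pyGetD det 0 0 - PySem.List.pyGetD x 0 0| ≤ t ∧
        |PySem.List.pyGetD det 1 0 - PySem.List.pyGetD x 1 0| ≤ t ∧
        |PySem.List.pyGetD det 2 0 - PySem.List.pyGetD x 2 0| ≤ t ∧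
        |PySem.List.pyGetD det 3 0 - PySem.List.pyGetD x 3 0| ≤ t) := by
        simpa [cdClose, and_assoc] using h
      simp [h', h]
    · have h' : ¬ (|PySem.List.pyGetD det 0 0 - PySem.List.pyGetD x 0 0| ≤ t ∧
        |PySem.List.pyGetD det 1 0 - PySem.List.pyGetD x 1 0| ≤ t ∧
        |PySem.List.pyGetD det 2 0 - PySem.List.pyGetD x 2 0| ≤ t ∧
        |PySem.List.pyGetD det 3 0 - PySem.List.pyGetD x 3 0| ≤ t) := by
        simp only [cdClose, Bool.and_eq_true, decide_eq_true_eq, and_assoc] at h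
        exact h
      simp [h', h]

-- the bucket of key k holds exactly the xml defects whose key is k, in order
theorem cd_grid (cell : Int) (xs : List (List Int))
    (g : PySem.Dict (Int × Int × Int × Int) (List (List Int))) (k : Int × Int × Int × Int) :
    (xs.foldl (fun g x => g.modify (cdKey x cell) [] (fun l => l ++ [x])) g).getD k []
      = g.getD k [] ++ xs.filter (fun x => decide (cdKey x cell = k)) := by
  induction xs generalizing g with
  | nil => simp
  | cons x rest ih =>
    simp only [List.foldl_cons, ih, PySem.Dict.getD_modify, List.filter_cons]
    by_cases h : cdKey x cell = k
    · simp [h]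
    · simp [h, Ne.symm h]

theorem cd_bucket_mem (cell : Int) (xs : List (List Int)) (k : Int × Int × Int × Int)
    (x : List Int) :
    x ∈ (xs.foldl (fun g x => g.modify (cdKey x cell) [] (fun l => l ++ [x]))
          (PySem.Dict.empty : PySem.Dict (Int × Int × Int × Int) (List (List Int)))).getD k []
      ↔ x ∈ xs ∧ cdKey x cell = k := by
  rw [cd_grid]
  simp [PySem.Dict.getD_empty, List.mem_filter]

-- a point within threshold t lands in the same or an adjacent cell of side t+1
theorem cd_div_close (a b t : Int) (ht : 0 ≤ t) (h : |a - b| ≤ t) :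
    -1 ≤ PySem.Int.floordiv a (t + 1) - PySem.Int.floordiv b (t + 1) ∧
      PySem.Int.floordiv a (t + 1) - PySem.Int.floordiv b (t + 1) ≤ 1 := by
  have hc : (0 : Int) < t + 1 := by omega
  set qa := PySem.Int.floordiv a (t + 1) with hqa
  set qb := PySem.Int.floordiv b (t + 1) with hqb
  have ha1 : qa * (t + 1) ≤ a := (PySem.Int.le_floordiv_iff_mul_le hc).mp le_rfl
  have ha2 : a < (qa + 1) * (t + 1) := (PySem.Int.floordiv_lt_iff_lt_mul hc).mp (lt_add_one _)
  have hb1 : qb * (t + 1) ≤ b := (PySem.Int.le_floordiv_iff_mul_le hc).mp le_rfl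
  have hb2 : b < (qb + 1) * (t + 1) := (PySem.Int.floordiv_lt_iff_lt_mul hc).mp (lt_add_one _)
  have habs := abs_le.mp h
  constructor
  · by_contra hcon
    push Not at hcon
    have hle : qa + 1 ≤ qb - 1 := by omega
    have : (qa + 1) * (t + 1) ≤ (qb - 1) * (t + 1) :=
      mul_le_mul_of_nonneg_right hle (by omega)
    nlinarith
  · by_contra hcon
    push Not at hcon
    have hle : qb + 1 ≤ qa - 1 := by omega
    have : (qb + 1) * (t + 1) ≤ (qa - 1) * (t + 1) :=
      mul_le_mul_of_nonneg_right hle (by omega)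
    nlinarith

theorem cd_mem_offsets (o : Int × Int × Int × Int)
    (h1 : -1 ≤ o.1 ∧ o.1 ≤ 1) (h2 : -1 ≤ o.2.1 ∧ o.2.1 ≤ 1)
    (h3 : -1 ≤ o.2.2.1 ∧ o.2.2.1 ≤ 1) (h4 : -1 ≤ o.2.2.2 ∧ o.2.2.2 ≤ 1) :
    o ∈ cdOffsets := by
  obtain ⟨a, b, c, d⟩ := o
  simp only [cdOffsets, List.mem_flatMap, List.mem_map]
  refine ⟨a, ?_, b, ?_, c, ?_, d, ?_, rfl⟩ <;> simp_all <;> omega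

-- B's neighbour-cell search finds a close xml defect iff one exists
theorem cd_search (det : List Int) (xml : List (List Int)) (t : Int) (ht : 0 ≤ t) :
    (cdOffsets.any (fun o =>
        ((xml.foldl (fun g x => g.modify (cdKey x (t + 1)) [] (fun l => l ++ [x]))
            (PySem.Dict.empty : PySem.Dict (Int × Int × Int × Int) (List (List Int)))).getD
          ((cdKey det (t + 1)).1 + o.1, (cdKey det (t + 1)).2.1 + o.2.1,
           (cdKey det (t + 1)).2.2.1 + o.2.2.1, (cdKey det (t + 1)).2.2.2 + o.2.2.2) []).any
          (fun x => cdClose det x t)) = true)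
      ↔ ∃ x ∈ xml, cdClose det x t = true := by
  simp only [List.any_eq_true]
  constructor
  · rintro ⟨o, _, x, hx, hcl⟩
    exact ⟨x, (cd_bucket_mem _ _ _ _).mp hx |>.1, hcl⟩
  · rintro ⟨x, hx, hcl⟩
    have hcl' := hcl
    simp only [cdClose, Bool.and_eq_true, decide_eq_true_eq] at hcl'
    obtain ⟨⟨⟨hc0, hc1⟩, hc2⟩, hc3⟩ := hcl'
    have d0 := cd_div_close _ _ t ht hc0
    have d1 := cd_div_close _ _ t ht hc1
    have d2 := cd_div_close _ _ t ht hc2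
    have d3 := cd_div_close _ _ t ht hc3
    refine ⟨((cdKey x (t+1)).1 - (cdKey det (t+1)).1,
            (cdKey x (t+1)).2.1 - (cdKey det (t+1)).2.1,
            (cdKey x (t+1)).2.2.1 - (cdKey det (t+1)).2.2.1,
            (cdKey x (t+1)).2.2.2 - (cdKey det (t+1)).2.2.2), ?_, x, ?_, hcl⟩
    · exact cd_mem_offsets _ ⟨by simp [cdKey]; omega, by simp [cdKey]; omega⟩
        ⟨by simp [cdKey]; omega, by simp [cdKey]; omega⟩
        ⟨by simp [cdKey]; omega, by simp [cdKey]; omega⟩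
        ⟨by simp [cdKey]; omega, by simp [cdKey]; omega⟩
    · refine (cd_bucket_mem _ _ _ _).mpr ⟨hx, ?_⟩
      simp only [cdKey]
      refine Prod.ext ?_ (Prod.ext ?_ (Prod.ext ?_ ?_)) <;> simp

theorem cd_foldl_const (dd : List (List Int)) (init : Int) :
    dd.foldl (fun acc (_ : List Int) => acc) init = init := by
  induction dd with
  | nil => rfl
  | cons _ _ ih => simp only [List.foldl_cons]; exact ih

-- ===== VERDICT (by name: the statement is the Claim_ definition above) =====
theorem compare_defects_spec : Claim_equal_compare_defects := by
  intro dd xml t _ _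
  unfold Spec_compare_defects compare_defects compare_defects_alt
  by_cases ht : t < 0
  · simp only [ht, true_or, if_pos]
    have : ∀ acc det, cdScan det xml t acc = acc := by
      intro acc det
      rw [cdScan_eq]
      have : ¬ ∃ x ∈ xml, cdClose det x t = true := by
        rintro ⟨x, _, hcl⟩
        simp only [cdClose, Bool.and_eq_true, decide_eq_true_eq] at hcl
        have := abs_nonneg (PySem.List.pyGetD det 0 0 - PySem.List.pyGetD x 0 0)
        omega
      simp [this]
    calc dd.foldl (fun acc det => cdScan det xml t acc) 0
        = dd.foldl (fun acc (_ : List Int) => acc) 0 := by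
          congr 1; funext acc det; exact this acc det
      _ = 0 := cd_foldl_const dd 0
  · by_cases hxml : xml = []
    · simp only [hxml, ht]
      simp only [true_or, or_true, if_pos]
      calc dd.foldl (fun acc det => cdScan det ([] : List (List Int)) t acc) 0
          = dd.foldl (fun acc (_ : List Int) => acc) 0 := by
            congr 1
        _ = 0 := cd_foldl_const dd 0
    · by_cases hdd : dd = []
      · simp [hdd]
      · have hguard : ¬ (t < 0 ∨ xml = [] ∨ dd = []) := by tauto
        simp only [hguard, if_neg, not_false_iff]
        congr 1
        funext acc det
        rw [cdScan_eq]
        have := cd_search det xml t (by omega)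
        by_cases hex : ∃ x ∈ xml, cdClose det x t = true
        · rw [if_pos hex, if_pos (this.mpr hex)]
        · rw [if_neg hex, if_neg (by rw [this]; exact hex)]
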